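-- pv_equiv track=rewrite | github.com/thebesttv/cg-fuzzing | .github/scripts/compute_changed_projects.py | pair_projects
-- ===== SOURCE A (Python) =====
-- from typing import List, Dict
--
-- def pair_projects(projects: List[str]) -> List[Dict[str, str]]:
--     """
--     Pair projects with a priority strategy:
--     1. First, put all projects one-by-one into proj1 slots (up to 256 workers)
--     2. If more than 256 projects, put the excess into proj2 slots of previous workers
--
--     Returns:
--         List of dicts with keys 'proj1' and 'proj2', where:
--         - proj1 != proj2 (always different)
--         - proj1 is always non-empty
--         - proj2 can be empty string "" (no second project)
--     """
--     if not projects: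
--         return []
--
--     MAX_WORKERS = 256
--     num_projects = len(projects)
--
--     # Strategy: First fill all proj1 slots, then fill proj2 slots if needed
--     if num_projects <= MAX_WORKERS:
--         # All projects fit in proj1 slots, proj2 remains empty
--         pairs = []
--         for i in range(num_projects):
--             pairs.append({
--                 "proj1": projects[i],
--                 "proj2": ""
--             })
--         return pairs
--     else:
--         # More than MAX_WORKERS projects
--         # First MAX_WORKERS go to proj1, remainder goes to proj2
--         pairs = []
--         for i in range(MAX_WORKERS):
--             proj1 = projects[i]
--             # Check if there's a corresponding project for proj2
--             proj2_index = MAX_WORKERS + i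
--             proj2 = projects[proj2_index] if proj2_index < num_projects else ""
--             pairs.append({
--                 "proj1": proj1,
--                 "proj2": proj2
--             })
--         return pairs
-- ===== SOURCE B (Python) =====
-- from typing import List, Dict
--
-- def pair_projects(projects: List[str]) -> List[Dict[str, str]]:
--     # Build-then-patch single pass: first 256 items each open a worker pair,
--     # items 256..511 are patched back into the proj2 slot of worker k-256.
--     pairs = []
--     for k, p in enumerate(projects):
--         if k < 256:
--             pairs.append({"proj1": p, "proj2": ""})
--         elif k < 512:
--             pairs[k - 256]["proj2"] = p
--         else:
--             break
--     return pairs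
-- ===== Notes on version B (the rewrite author's own statement) =====
-- stated objective: alternative
-- what changed: Replaces A's index-arithmetic loops that look ahead to projects[i+256] with a single build-then-patch pass over enumerate(projects): each of the first 256 items appends a fresh pair, items 256-511 mutate the proj2 slot of the pair built 256 steps earlier, and the loop breaks at 512.
import Mathlib
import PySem

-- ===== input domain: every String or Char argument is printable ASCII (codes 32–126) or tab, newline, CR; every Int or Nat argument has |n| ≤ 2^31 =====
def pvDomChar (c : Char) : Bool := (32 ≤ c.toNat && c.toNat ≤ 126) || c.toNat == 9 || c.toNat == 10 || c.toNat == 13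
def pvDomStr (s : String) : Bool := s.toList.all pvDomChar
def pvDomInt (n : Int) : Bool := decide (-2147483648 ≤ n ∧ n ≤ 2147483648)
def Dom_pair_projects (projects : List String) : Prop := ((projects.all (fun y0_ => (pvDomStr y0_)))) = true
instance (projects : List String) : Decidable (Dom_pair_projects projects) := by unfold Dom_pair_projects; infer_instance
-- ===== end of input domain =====

-- B replaces A's lookahead index arithmetic (projects[i+256]) with a single
-- build-then-patch pass over enumerate(projects): the first 256 items each append
-- a fresh pair, items 256..511 mutate the proj2 slot of the pair built 256 steps
-- earlier, and the loop breaks at index 512 (objective: alternative).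

-- ===== PORT A =====
def pair_projects (projects : List String) : List (List (String × String)) :=
  if projects = [] then []
  else
    let MAX_WORKERS : Int := 256
    let num_projects : Int := projects.length
    if num_projects ≤ MAX_WORKERS then
      (PySem.List.pyRange 0 num_projects 1).foldl
        (fun pairs i =>
          pairs ++ [[("proj1", PySem.List.pyGetD projects i ""), ("proj2", "")]]) []
    else
      (PySem.List.pyRange 0 MAX_WORKERS 1).foldl
        (fun pairs i =>
          let proj1 := PySem.List.pyGetD projects i ""
          let proj2_index := MAX_WORKERS + i
          let proj2 := if proj2_index < num_projects then PySem.List.pyGetD projects proj2_index "" else ""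
          pairs ++ [[("proj1", proj1), ("proj2", proj2)]]) []

-- ===== PORT B =====
-- the loop body of Source B: k is the enumerate counter, pairs the accumulator;
-- pairs[k-256]["proj2"] = p is List.modify with a dict-insert (overwrite in place),
-- break is the final branch returning pairs.
def bLoop (k : Nat) (pairs : List (List (String × String))) :
    List String → List (List (String × String))
  | [] => pairs
  | p :: rest =>
    if k < 256 then
      bLoop (k + 1) (pairs ++ [[("proj1", p), ("proj2", "")]]) rest
    else if k < 512 then
      bLoop (k + 1)
        (pairs.modify (k - 256) (fun d => (PySem.Dict.insert ⟨d⟩ "proj2" p).items)) rest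
    else pairs

def pair_projects_alt (projects : List String) : List (List (String × String)) :=
  bLoop 0 [] projects

-- ===== PRECONDITION & SPEC =====
def Spec_pair_projects (projects : List String) (out : List (List (String × String))) : Prop := out = pair_projects_alt projects
instance (projects : List String) (out : List (List (String × String))) : Decidable (Spec_pair_projects projects out) := by unfold Spec_pair_projects; infer_instance

-- ===== CLAIM (what is proved, stated in full; the proofs are below) =====
def Claim_equal_pair_projects : Prop := ∀ (projects : List String), Dom_pair_projects projects → Spec_pair_projects projects (pair_projects projects)

-- ===== LEMMAS AND PROOFS =====

-- common closed form both programs compute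
def pairSpec (xs : List String) : List (List (String × String)) :=
  (List.range (min 256 xs.length)).map
    (fun i => [("proj1", xs.getD i ""), ("proj2", xs.getD (256 + i) "")])

def fillOut (xs : List String) : List (List (String × String)) :=
  xs.map (fun p => [("proj1", p), ("proj2", "")])

-- proj2-patched zip: pairs each front item with a back item while one remains
def zipP : List String → List String → List (List (String × String))
  | [], _ => []
  | f :: fs, [] => [("proj1", f), ("proj2", "")] :: zipP fs []
  | f :: fs, y :: ys => [("proj1", f), ("proj2", y)] :: zipP fs ys

theorem modify_append_cons {α : Type} (l1 : List α) (d : α) (l2 : List α) (f : α → α) :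
    (l1 ++ d :: l2).modify l1.length f = l1 ++ f d :: l2 := by
  induction l1 with
  | nil => simp [List.modify]
  | cons a t ih => simpa [List.modify] using ih

theorem insert_proj2 (f p : String) :
    (PySem.Dict.insert ⟨[("proj1", f), ("proj2", "")]⟩ "proj2" p).items
      = [("proj1", f), ("proj2", p)] := by
  rw [PySem.Dict.items_insert]
  simp

theorem bLoop_512 (pairs : List (List (String × String))) (ys : List String) :
    bLoop 512 pairs ys = pairs := by
  cases ys <;> simp [bLoop]

theorem bLoop_fill (xs : List String) : ∀ (j : Nat) (pairs : List (List (String × String))), j ≤ 256 →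
    bLoop j pairs xs = bLoop 256 (pairs ++ fillOut (xs.take (256 - j))) (xs.drop (256 - j)) := by
  induction xs with
  | nil => intro j pairs _; simp [bLoop, fillOut]
  | cons p rest ih =>
    intro j pairs hj
    by_cases hlt : j < 256
    · have h1 : 256 - j = (256 - (j + 1)) + 1 := by omega
      rw [show bLoop j pairs (p :: rest) =
          bLoop (j + 1) (pairs ++ [[("proj1", p), ("proj2", "")]]) rest from by
            simp [bLoop, hlt],
        ih (j + 1) _ (by omega), h1, List.take_succ_cons, List.drop_succ_cons]
      simp [fillOut]
    · have hj' : j = 256 := by omega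
      subst hj'
      simp [fillOut]

theorem zipP_nil (fs : List String) : zipP fs [] = fillOut fs := by
  induction fs with
  | nil => simp [zipP, fillOut]
  | cons f fs' ih => simp [zipP, fillOut] at ih ⊢; exact ih

theorem bLoop_patch : ∀ (front ys : List String) (done : List (List (String × String))),
    done.length + front.length = 256 →
    bLoop (256 + done.length) (done ++ fillOut front) ys = done ++ zipP front ys := by
  intro front
  induction front with
  | nil =>
    intro ys done h
    have h2 : done.length = 256 := by simpa using h
    simp [fillOut, zipP, h2, bLoop_512]
  | cons f fs ih =>
    intro ys done h
    cases ys with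
    | nil =>
      rw [show bLoop (256 + done.length) (done ++ fillOut (f :: fs)) [] =
          done ++ fillOut (f :: fs) from rfl, zipP_nil]
    | cons y rest =>
      have hk1 : ¬ (256 + done.length < 256) := by omega
      have hk2 : 256 + done.length < 512 := by
        simp only [List.length_cons] at h; omega
      rw [show bLoop (256 + done.length) (done ++ fillOut (f :: fs)) (y :: rest) =
          bLoop (256 + done.length + 1)
            ((done ++ fillOut (f :: fs)).modify (256 + done.length - 256)
              (fun d => (PySem.Dict.insert ⟨d⟩ "proj2" y).items)) rest from by
            simp [bLoop, hk1, hk2]]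
      have hidx : 256 + done.length - 256 = done.length := by omega
      rw [hidx, show (fillOut (f :: fs)) = [("proj1", f), ("proj2", "")] :: fillOut fs from rfl,
        modify_append_cons, insert_proj2]
      have hrec := ih rest (done ++ [[("proj1", f), ("proj2", y)]])
        (by simp only [List.length_append, List.length_cons, List.length_nil] at h ⊢; omega)
      simp only [List.length_append, List.length_cons, List.length_nil] at hrec
      rw [show 256 + done.length + 1 = 256 + (done.length + (0 + 1)) from by omega]
      simpa [zipP] using hrec

theorem zipP_eq_map : ∀ (fs ys : List String),
    zipP fs ys = (List.range fs.length).map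
      (fun i => [("proj1", fs.getD i ""), ("proj2", ys.getD i "")]) := by
  intro fs
  induction fs with
  | nil => intro ys; simp [zipP]
  | cons f fs' ih =>
    intro ys
    cases ys with
    | nil =>
      simp only [zipP, List.length_cons, List.range_succ_eq_map, List.map_cons, List.map_map, List.cons.injEq]
      refine ⟨by simp, ?_⟩
      rw [ih []]
      apply List.map_congr_left
      intro i _
      simp [Function.comp]
    | cons y ys' =>
      simp only [zipP, List.length_cons, List.range_succ_eq_map, List.map_cons, List.map_map, List.cons.injEq]
      refine ⟨by simp, ?_⟩
      rw [ih ys']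
      apply List.map_congr_left
      intro i _
      simp [Function.comp]

theorem b_eq_pairSpec (xs : List String) : pair_projects_alt xs = pairSpec xs := by
  unfold pair_projects_alt pairSpec
  rw [bLoop_fill xs 0 [] (by omega)]
  simp only [Nat.sub_zero, List.nil_append]
  by_cases hle : xs.length ≤ 256
  · rw [List.take_of_length_le hle, List.drop_eq_nil_of_le hle]
    rw [show bLoop 256 (fillOut xs) [] = fillOut xs from rfl, ← zipP_nil, zipP_eq_map]
    rw [show min 256 xs.length = xs.length from by omega]
    apply List.map_congr_left
    intro i hi
    simp only [List.mem_range] at hi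
    simp [List.getD_eq_getElem?_getD,
      List.getElem?_eq_none (show xs.length ≤ 256 + i by omega)]
  · have hlen : 256 < xs.length := by omega
    have hfl : (xs.take 256).length = 256 := by simp; omega
    have := bLoop_patch (xs.take 256) (xs.drop 256) [] (by simpa using hfl)
    simp only [List.length_nil, Nat.add_zero, List.nil_append] at this
    rw [this, zipP_eq_map, hfl]
    rw [show min 256 xs.length = 256 from by omega]
    apply List.map_congr_left
    intro i hi
    simp only [List.mem_range] at hi
    simp [List.getD_eq_getElem?_getD, hi, List.getElem?_drop]

theorem a_eq_pairSpec (xs : List String) : pair_projects xs = pairSpec xs := by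
  unfold pair_projects pairSpec
  by_cases hnil : xs = []
  · subst hnil; simp
  · simp only [hnil, if_false]
    by_cases hle : (xs.length : Int) ≤ 256
    · have hlen : xs.length ≤ 256 := by exact_mod_cast hle
      rw [if_pos hle, PySem.List.foldl_append_singleton_eq_map, PySem.List.pyRange_one]
      simp only [List.nil_append, List.map_map, sub_zero, Int.toNat_natCast]
      rw [show min 256 xs.length = xs.length from by omega]
      apply List.map_congr_left
      intro k hk
      simp only [List.mem_range] at hk
      simp [Function.comp, PySem.List.pyGetD_natCast,
        List.getElem?_eq_none (show xs.length ≤ 256 + k by omega)]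
    · have hlen : 256 < xs.length := by
        have := not_le.mp hle
        exact_mod_cast this
      rw [if_neg hle, PySem.List.foldl_append_singleton_eq_map, PySem.List.pyRange_one]
      simp only [List.nil_append, List.map_map, sub_zero,
        show Int.toNat 256 = 256 from rfl]
      rw [show min 256 xs.length = 256 from by omega]
      apply List.map_congr_left
      intro k hk
      simp only [List.mem_range] at hk
      have hcast : ((256:Int) + (k:Int)) = ((256 + k : Nat) : Int) := by push_cast; ring
      by_cases h2 : 256 + k < xs.length
      · have h2' : ((256:Int) + (k:Int)) < (xs.length : Int) := by omega
        simp only [Function.comp, zero_add, hcast,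
          PySem.List.pyGetD_natCast, List.getD_eq_getElem?_getD]
        rw [if_pos (by exact_mod_cast h2)]
      · have h2' : ¬ ((256:Int) + (k:Int)) < (xs.length : Int) := by omega
        simp [Function.comp, if_neg h2',
          List.getElem?_eq_none (show xs.length ≤ 256 + k by omega)]

-- ===== VERDICT (by name: the statement is the Claim_ definition above) =====
theorem pair_projects_spec : Claim_equal_pair_projects := by
  intro projects _
  unfold Spec_pair_projects
  rw [a_eq_pairSpec, b_eq_pairSpec]
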